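-- pv_equiv track=rewrite | github.com/molachkar/CONCIEL | Processors/config/memory_manager.py | _compress_reasoning
-- ===== SOURCE A (Python) =====
-- from typing import Dict, List, Optional
--
-- def _compress_reasoning(outputs: List[Dict]) -> str:
--     """
--     Compress multiple reasoning strings into one sentence
--
--     Args:
--         outputs: List of agent outputs
--
--     Returns:
--         Compressed reasoning string
--     """
--     reasoning_list = []
--
--     for output in outputs:
--         if "analysis" in output and "reasoning" in output["analysis"]:
--             reasoning_list.append(output["analysis"]["reasoning"])
--
--     if not reasoning_list:
--         return "No analysis available"
--
--     # Return the last (most recent) reasoning as summary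
--     return reasoning_list[-1]
-- ===== SOURCE B (Python) =====
-- from typing import Dict, List, Optional
--
-- def _compress_reasoning(outputs: List[Dict]) -> str:
--     # Scan backwards and return the first (= most recent) reasoning found.
--     for i in range(len(outputs) - 1, -1, -1):
--         output = outputs[i]
--         if "analysis" in output and "reasoning" in output["analysis"]:
--             return output["analysis"]["reasoning"]
--     return "No analysis available"
-- ===== Notes on version B (the rewrite author's own statement) =====
-- stated objective: simpler
-- what changed: Replaced the forward pass that accumulates every matching reasoning into a list (then takes its last element) by a backward scan that returns the first match immediately, keeping no intermediate list.
import Mathlib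
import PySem

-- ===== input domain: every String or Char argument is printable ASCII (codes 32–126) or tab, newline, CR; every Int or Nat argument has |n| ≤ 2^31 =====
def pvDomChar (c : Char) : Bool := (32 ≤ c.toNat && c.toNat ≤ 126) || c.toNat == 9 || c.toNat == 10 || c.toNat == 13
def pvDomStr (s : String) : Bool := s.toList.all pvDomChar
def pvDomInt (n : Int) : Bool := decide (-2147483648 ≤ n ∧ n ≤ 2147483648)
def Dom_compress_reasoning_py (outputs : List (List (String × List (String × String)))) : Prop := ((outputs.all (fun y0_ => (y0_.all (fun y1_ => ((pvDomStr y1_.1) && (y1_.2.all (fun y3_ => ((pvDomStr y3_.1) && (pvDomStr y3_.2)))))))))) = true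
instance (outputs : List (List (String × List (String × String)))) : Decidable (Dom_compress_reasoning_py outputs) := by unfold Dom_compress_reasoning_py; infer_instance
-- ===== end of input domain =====

-- B replaces A's forward accumulate-all-then-take-last pass by a backward scan
-- returning the first match (objective: simpler).

-- ===== PORT A =====
-- loop body: append output["analysis"]["reasoning"] when both keys are present
def pvStepA (acc : List String) (output : List (String × List (String × String))) : List String :=
  match output.lookup "analysis" with
  | some inner =>
      match inner.lookup "reasoning" with
      | some r => acc ++ [r]
      | none => acc
  | none => acc

def compress_reasoning_py (outputs : List (List (String × List (String × String)))) : String :=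
  let reasoning_list := outputs.foldl pvStepA []
  if reasoning_list.isEmpty then "No analysis available"
  else
    -- reasoning_list[-1]; in range because the list is nonempty
    (PySem.List.pyGet? reasoning_list (-1)).getD ""

-- ===== PORT B =====
-- backward index loop with early return = first match over the reversed list
def pvScanB : List (List (String × List (String × String))) → String
  | [] => "No analysis available"
  | output :: rest =>
      match output.lookup "analysis" with
      | some inner =>
          match inner.lookup "reasoning" with
          | some r => r
          | none => pvScanB rest
      | none => pvScanB rest

def compress_reasoning_py_alt (outputs : List (List (String × List (String × String)))) : String :=
  pvScanB outputs.reverse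

-- ===== PRECONDITION & SPEC =====
def Spec_compress_reasoning_py (outputs : List (List (String × List (String × String)))) (out : String) : Prop := out = compress_reasoning_py_alt outputs
instance (outputs : List (List (String × List (String × String)))) (out : String) : Decidable (Spec_compress_reasoning_py outputs out) := by unfold Spec_compress_reasoning_py; infer_instance

-- ===== CLAIM (what is proved, stated in full; the proofs are below) =====
def Claim_equal_compress_reasoning_py : Prop := ∀ (outputs : List (List (String × List (String × String)))), Dom_compress_reasoning_py outputs → Spec_compress_reasoning_py outputs (compress_reasoning_py outputs)

-- ===== LEMMAS AND PROOFS =====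

theorem pvStepA_split (acc : List String) (o : List (String × List (String × String))) :
    pvStepA acc o = acc ++ pvStepA [] o := by
  unfold pvStepA
  cases ha : o.lookup "analysis" with
  | none => simp
  | some inner => cases hr : inner.lookup "reasoning" <;> simp [hr]

-- B over the reverse = last element of A's accumulated list (default if empty)
theorem pvKey (outs : List (List (String × List (String × String)))) :
    pvScanB outs.reverse = ((outs.foldl pvStepA []).getLast?).getD "No analysis available" := by
  induction outs using List.reverseRecOn with
  | nil => simp [pvScanB]
  | append_singleton ys o ih =>
      rw [List.reverse_append, List.foldl_append]
      simp only [List.reverse_singleton, List.singleton_append, List.foldl_cons, List.foldl_nil]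
      rw [pvStepA_split]
      cases ha : o.lookup "analysis" with
      | none => simpa [pvScanB, pvStepA, ha] using ih
      | some inner =>
          cases hr : inner.lookup "reasoning" with
          | none => simpa [pvScanB, pvStepA, ha, hr] using ih
          | some r => simp [pvScanB, pvStepA, ha, hr]

-- ===== VERDICT (by name: the statement is the Claim_ definition above) =====
theorem compress_reasoning_py_spec : Claim_equal_compress_reasoning_py := by
  intro outputs _
  unfold Spec_compress_reasoning_py compress_reasoning_py compress_reasoning_py_alt
  rw [pvKey]
  cases h : outputs.foldl pvStepA [] with
  | nil => simp
  | cons a l =>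
      simp only [List.isEmpty_cons]
      rw [PySem.List.pyGet?_neg_one]
      cases hl : (a :: l).getLast? with
      | none => simp at hl
      | some x => simp
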